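-- pv_equiv track=rewrite | github.com/FranciscoFSilva/create-bib | main.py | get_authors_string
-- ===== SOURCE A (Python) =====
-- def get_authors_string(authors):
--     noAuthors = len(authors)
--     stringList = [""]*(2*noAuthors-1)
--     stringList[1::2] = ["and"]*(noAuthors-1)
--     idx = 0
--     for author in authors:
--         given = ""
--         family = ""
--         if "given" in author:
--             given = author["given"]
--         if "family" in author:
--             family = author["family"]
--         stringList[idx] = family + ", " + given
--         idx +=2
--     return stringList
-- ===== SOURCE B (Python) =====
-- def get_authors_string(authors):
--     names = [a.get('family', '') + ', ' + a.get('given', '') for a in authors]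
--     out = []
--     for name in names:
--         if out:
--             out.append('and')
--         out.append(name)
--     return out
-- ===== Notes on version B (the rewrite author's own statement) =====
-- stated objective: simpler
-- what changed: B builds the name strings in one pass and then interleaves 'and' while appending, instead of preallocating a size-(2n-1) list, filling odd slots by stride-2 slice assignment and even slots by an index-stepping loop.
import Mathlib
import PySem

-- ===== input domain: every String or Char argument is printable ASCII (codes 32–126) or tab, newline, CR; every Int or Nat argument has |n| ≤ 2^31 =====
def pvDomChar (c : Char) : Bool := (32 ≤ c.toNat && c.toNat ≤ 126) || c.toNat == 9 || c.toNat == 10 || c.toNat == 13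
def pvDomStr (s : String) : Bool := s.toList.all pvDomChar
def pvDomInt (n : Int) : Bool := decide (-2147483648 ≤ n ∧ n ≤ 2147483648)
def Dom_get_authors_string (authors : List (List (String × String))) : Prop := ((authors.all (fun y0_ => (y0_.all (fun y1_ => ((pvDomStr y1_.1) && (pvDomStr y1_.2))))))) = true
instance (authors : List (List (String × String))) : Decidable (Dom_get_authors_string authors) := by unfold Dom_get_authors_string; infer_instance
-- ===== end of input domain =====

-- B interleaves 'and' while appending names built in one pass, instead of A's preallocated
-- size-(2n-1) list with stride-2 slice assignment and an index-stepping fill loop (objective: simpler).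

-- ===== PORT A =====
-- stringList[1::2] = vals : assign vals to indices i, i+2, i+4, … (length matches by construction)
def pyAssignStride2 (lst : List String) (i : Nat) (vals : List String) : List String :=
  match vals with
  | [] => lst
  | v :: vs => pyAssignStride2 (lst.set i v) (i + 2) vs

def get_authors_string (authors : List (List (String × String))) : List String :=
  let noAuthors : Int := authors.length
  -- [""]*(2*noAuthors-1): Python's list-times with a negative count gives [], as does .toNat = 0
  let stringList : List String := List.replicate (2 * noAuthors - 1).toNat ""
  let stringList := pyAssignStride2 stringList 1 (List.replicate (noAuthors - 1).toNat "and")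
  -- 'if "given" in author: given = author["given"]' = first-match assoc lookup with default ""
  (authors.foldl
    (fun (st : List String × Nat) author =>
      let given := (author.lookup "given").getD ""
      let family := (author.lookup "family").getD ""
      (st.1.set st.2 (family ++ ", " ++ given), st.2 + 2))
    (stringList, 0)).1

-- ===== PORT B =====
def get_authors_string_alt (authors : List (List (String × String))) : List String :=
  let names := authors.map (fun a =>
    ((a.lookup "family").getD "") ++ ", " ++ ((a.lookup "given").getD ""))
  names.foldl (fun out name =>
    (if out ≠ [] then out ++ ["and"] else out) ++ [name]) []

-- ===== PRECONDITION & SPEC =====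
def Spec_get_authors_string (authors : List (List (String × String))) (out : List String) : Prop := out = get_authors_string_alt authors
instance (authors : List (List (String × String))) (out : List String) : Decidable (Spec_get_authors_string authors out) := by unfold Spec_get_authors_string; infer_instance

-- ===== CLAIM (what is proved, stated in full; the proofs are below) =====
def Claim_equal_get_authors_string : Prop := ∀ (authors : List (List (String × String))), Dom_get_authors_string authors → Spec_get_authors_string authors (get_authors_string authors)

-- ===== LEMMAS AND PROOFS =====

-- the name extracted from one author record
def pvName (a : List (String × String)) : String :=
  ((a.lookup "family").getD "") ++ ", " ++ ((a.lookup "given").getD "")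

-- A's fill loop, abstracted over the names
def pvSetFold (vals : List String) (lst : List String) (i : Nat) : List String :=
  match vals with
  | [] => lst
  | v :: vs => pvSetFold vs (lst.set i v) (i + 2)

-- the skeleton [""] ++ (["and",""] * m) after the stride-2 assignment
def pvFlat : Nat → List String
  | 0 => []
  | m + 1 => "and" :: "" :: pvFlat m

def pvInterFlat (xs : List String) : List String := xs.flatMap (fun y => ["and", y])

theorem pvSetFold_shift (vs : List String) : ∀ (rest : List String) (i : Nat) (a : String),
    pvSetFold vs (a :: rest) (i + 1) = a :: pvSetFold vs rest i := by
  induction vs with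
  | nil => intro rest i a; rfl
  | cons v vs ih =>
    intro rest i a
    simp only [pvSetFold, List.set]
    rw [show i + 1 + 2 = i + 2 + 1 from by omega]
    exact ih (rest.set i v) (i + 2) a

theorem pyAssignStride2_shift (vs : List String) : ∀ (rest : List String) (i : Nat) (a : String),
    pyAssignStride2 (a :: rest) (i + 1) vs = a :: pyAssignStride2 rest i vs := by
  induction vs with
  | nil => intro rest i a; rfl
  | cons v vs ih =>
    intro rest i a
    simp only [pyAssignStride2, List.set]
    rw [show i + 1 + 2 = i + 2 + 1 from by omega]
    exact ih (rest.set i v) (i + 2) a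

theorem pvFlat_eq (m : Nat) :
    pyAssignStride2 (List.replicate (2 * m) "") 0 (List.replicate m "and") = pvFlat m := by
  induction m with
  | zero => rfl
  | succ k ih =>
    have h2 : 2 * (k + 1) = (2 * k) + 1 + 1 := by ring
    rw [h2]
    simp only [List.replicate_succ, pvFlat, pyAssignStride2, List.set]
    rw [show (0 + 2 : Nat) = 0 + 1 + 1 from rfl, pyAssignStride2_shift, pyAssignStride2_shift, ih]

theorem pvSkeleton (m : Nat) :
    pyAssignStride2 (List.replicate (2 * m + 1) "") 1 (List.replicate m "and")
      = "" :: pvFlat m := by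
  have h : (2 * m + 1) = (2 * m) + 1 := rfl
  rw [h, List.replicate_succ, show (1 : Nat) = 0 + 1 by rfl, pyAssignStride2_shift, pvFlat_eq]

theorem pvSetFold_flat (xs : List String) :
    pvSetFold xs (pvFlat xs.length) 1 = pvInterFlat xs := by
  induction xs with
  | nil => rfl
  | cons y ys ih =>
    simp only [List.length_cons, pvFlat, pvSetFold, List.set]
    rw [show (1 + 2 : Nat) = 1 + 1 + 1 from rfl, pvSetFold_shift, pvSetFold_shift, ih]
    simp [pvInterFlat]

-- A's main loop equals pvSetFold over the extracted names
theorem pvLoopA (authors : List (List (String × String))) :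
    ∀ (lst : List String) (i : Nat),
    (authors.foldl
      (fun (st : List String × Nat) author =>
        let given := (author.lookup "given").getD ""
        let family := (author.lookup "family").getD ""
        (st.1.set st.2 (family ++ ", " ++ given), st.2 + 2))
      (lst, i)).1 = pvSetFold (authors.map pvName) lst i := by
  induction authors with
  | nil => intro lst i; rfl
  | cons a as ih =>
    intro lst i
    simp only [List.foldl_cons, List.map_cons]
    exact ih (lst.set i (pvName a)) (i + 2)

-- B's loop with a nonempty accumulator appends interleaved names
theorem pvLoopB (names : List String) : ∀ (acc : List String), acc ≠ [] →
    names.foldl (fun out name => (if out ≠ [] then out ++ ["and"] else out) ++ [name]) acc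
      = acc ++ pvInterFlat names := by
  induction names with
  | nil => intro acc _; simp [pvInterFlat]
  | cons x xs ih =>
    intro acc hacc
    simp only [List.foldl_cons, if_pos hacc]
    rw [ih (acc ++ ["and"] ++ [x]) (by simp)]
    simp [pvInterFlat]

theorem pvB_eq (authors : List (List (String × String))) :
    get_authors_string_alt authors
      = match authors.map pvName with
        | [] => []
        | x :: xs => x :: pvInterFlat xs := by
  unfold get_authors_string_alt
  cases authors with
  | nil => rfl
  | cons a as =>
    simp only [List.map_cons, List.foldl_cons]
    show List.foldl (fun out name => (if out ≠ [] then out ++ ["and"] else out) ++ [name])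
        ((fun (out : List String) name => (if out ≠ [] then out ++ ["and"] else out) ++ [name]) [] (pvName a))
        (as.map pvName) = pvName a :: pvInterFlat (as.map pvName)
    rw [show ((fun (out : List String) name => (if out ≠ [] then out ++ ["and"] else out) ++ [name]) [] (pvName a)) = [pvName a] from by simp]
    rw [pvLoopB (as.map pvName) [pvName a] (by simp)]
    simp

theorem pvA_eq (authors : List (List (String × String))) :
    get_authors_string authors
      = match authors.map pvName with
        | [] => []
        | x :: xs => x :: pvInterFlat xs := by
  unfold get_authors_string
  cases authors with
  | nil => rfl
  | cons a as =>
    simp only []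
    rw [pvLoopA]
    have hlen : (2 * ((a :: as).length : Int) - 1).toNat = 2 * as.length + 1 := by
      simp [List.length_cons]; omega
    have hlen2 : (((a :: as).length : Int) - 1).toNat = as.length := by
      simp [List.length_cons]
    rw [hlen, hlen2, pvSkeleton]
    simp only [List.map_cons]
    show pvSetFold (pvName a :: as.map pvName) ("" :: pvFlat as.length) 0 = _
    simp only [pvSetFold, List.set]
    rw [show (0 + 2 : Nat) = 1 + 1 from rfl, pvSetFold_shift]
    rw [show as.length = (as.map pvName).length by simp, pvSetFold_flat]

-- ===== VERDICT (by name: the statement is the Claim_ definition above) =====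
theorem get_authors_string_spec : Claim_equal_get_authors_string := by
  intro authors _
  unfold Spec_get_authors_string
  rw [pvA_eq, pvB_eq]
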